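-- pv_equiv track=rewrite | github.com/PardhuKadali/INNOMATICS_BATCH_225 | stringmethods.py | Rstrip
-- ===== SOURCE A (Python) =====
-- def Rstrip(word):
--     chars=None
--     if chars is None:
--         chars = ' \t\n\r\f\v'
--     index = len(word) - 1
--     while index >= 0:
--         if word[index] not in chars:
--             break
--         index -= 1
--     return word[:index+1]
-- ===== SOURCE B (Python) =====
-- def Rstrip(word):
--     last = -1
--     for i, c in enumerate(word):
--         if c not in ' \t\n\r\f\v':
--             last = i
--     return word[:last+1]
-- ===== Notes on version B (the rewrite author's own statement) =====
-- stated objective: alternative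
-- what changed: Replaces the backward early-break scan from the end with a single forward pass that tracks the index of the last non-whitespace character and slices up to it.
import Mathlib
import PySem

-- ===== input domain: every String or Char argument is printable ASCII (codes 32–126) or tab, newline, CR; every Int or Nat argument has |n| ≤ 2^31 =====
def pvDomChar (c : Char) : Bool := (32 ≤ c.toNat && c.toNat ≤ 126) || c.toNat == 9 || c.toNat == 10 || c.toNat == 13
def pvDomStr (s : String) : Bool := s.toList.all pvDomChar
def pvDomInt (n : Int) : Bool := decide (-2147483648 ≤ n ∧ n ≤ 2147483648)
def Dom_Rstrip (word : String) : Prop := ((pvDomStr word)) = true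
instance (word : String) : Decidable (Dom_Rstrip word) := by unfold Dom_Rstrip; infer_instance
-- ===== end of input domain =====

-- B replaces A's backward early-break scan with a single forward pass tracking the
-- last non-whitespace index (objective: alternative decomposition, same cost).

-- membership in the literal string ' \t\n\r\f\v' (both Pythons use this very test)
def pvIsWs (c : Char) : Bool :=
  c == ' ' || c == '\t' || c == '\n' || c == '\r' || c == '\x0c' || c == '\x0b'

-- ===== PORT A =====
-- A's while-loop, descending index; argument is index+1 (so 0 means index = -1);
-- returns the final index+1.  The index is always in range, so getD is exact here.
def pvAloop (cs : List Char) : Nat → Nat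
  | 0 => 0
  | i + 1 => if pvIsWs (cs.getD i ' ') then pvAloop cs i else i + 1

-- word[:index+1] with 0 ≤ index+1 ≤ len(word) is exactly List.take (index+1)
def Rstrip (word : String) : String :=
  String.mk (word.toList.take (pvAloop word.toList word.toList.length))

-- ===== PORT B =====
-- B's forward pass: i is the current enumerate index, last the tracked accumulator
def pvBloop (last : Int) (i : Nat) : List Char → Int
  | [] => last
  | c :: t => pvBloop (if pvIsWs c then last else (i : Int)) (i + 1) t

-- word[:last+1] with 0 ≤ last+1 ≤ len(word) is exactly List.take (last+1)
def Rstrip_alt (word : String) : String :=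
  String.mk (word.toList.take (pvBloop (-1) 0 word.toList + 1).toNat)

-- ===== PRECONDITION & SPEC =====
def Spec_Rstrip (word : String) (out : String) : Prop := out = Rstrip_alt word
instance (word : String) (out : String) : Decidable (Spec_Rstrip word out) := by unfold Spec_Rstrip; infer_instance

-- ===== CLAIM (what is proved, stated in full; the proofs are below) =====
def Claim_equal_Rstrip : Prop := ∀ (word : String), Dom_Rstrip word → Spec_Rstrip word (Rstrip word)

-- ===== LEMMAS AND PROOFS =====

-- A's loop only inspects indices below its argument
theorem pvAloop_append (cs ds : List Char) :
    ∀ i, i ≤ cs.length → pvAloop (cs ++ ds) i = pvAloop cs i := by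
  intro i
  induction i with
  | zero => intro _; rfl
  | succ i ih =>
    intro hi
    have hlt : i < cs.length := by omega
    simp only [pvAloop, List.getD_append _ _ _ _ hlt, ih (by omega)]

-- B's fold over a list extended by one character
theorem pvBloop_append (c : Char) :
    ∀ (xs : List Char) (last : Int) (i : Nat),
      pvBloop last i (xs ++ [c]) =
        if pvIsWs c then pvBloop last i xs else (i + xs.length : Int) := by
  intro xs
  induction xs with
  | nil => intro last i; by_cases h : pvIsWs c <;> simp [pvBloop, h]
  | cons x t ih =>
    intro last i
    by_cases h : pvIsWs c <;>
      simp [pvBloop, ih, h] <;> push_cast <;> ring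

-- the two loops agree: final index+1 of A equals B's last+1
theorem pvLoops_eq (cs : List Char) :
    (pvAloop cs cs.length : Int) = pvBloop (-1) 0 cs + 1 := by
  induction cs using List.reverseRecOn with
  | nil => rfl
  | append_singleton t c ih =>
    have hget : (t ++ [c]).getD t.length ' ' = c := by
      simp [List.getD]
    by_cases h : pvIsWs c
    · simp only [List.length_append, List.length_cons, List.length_nil,
        pvAloop, hget, h, if_true, pvBloop_append,
        pvAloop_append t [c] t.length (le_refl _)]
      exact ih
    · simp only [List.length_append, List.length_cons, List.length_nil,
        pvAloop, hget, h, if_false, pvBloop_append]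
      push_cast
      ring

-- ===== VERDICT (by name: the statement is the Claim_ definition above) =====
theorem Rstrip_spec : Claim_equal_Rstrip := by
  intro word _
  unfold Spec_Rstrip Rstrip Rstrip_alt
  have h := pvLoops_eq word.toList
  have : (pvBloop (-1) 0 word.toList + 1).toNat = pvAloop word.toList word.toList.length := by
    omega
  rw [this]
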